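-- pv_equiv track=rewrite | github.com/pica2108/TFG_GenProc | Mis Obras/WFC/WFC_Pro/p.py | actualizar_matriz
-- ===== SOURCE A (Python) =====
-- def actualizar_matriz(duplas, matriz):
--     # Mapeo para unificar valores según las duplas
--     mapeo = {}
--
--     for a, b in duplas:
--         # Si 'a' ya fue actualizado antes, usa el valor actualizado
--         valor_a = mapeo.get(a, matriz[a // len(matriz)][a % len(matriz)])
--
--         # Actualiza el valor en la posición 'b'
--         mapeo[b] = valor_a
--
--     # Aplicar los cambios a la matriz
--     for key, value in mapeo.items():
--         matriz[key // len(matriz)][key % len(matriz)] = value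
--
--     return matriz
-- ===== SOURCE B (Python) =====
-- def actualizar_matriz(duplas, matriz):
--     # Single pass, in place: the target cell always receives the live value of
--     # the source cell, which equals A's "mapeo" value because equal indices
--     # address equal cells.
--     n = len(matriz)
--     for a, b in duplas:
--         matriz[b // n][b % n] = matriz[a // n][a % n]
--     return matriz
-- ===== Notes on version B (the rewrite author's own statement) =====
-- stated objective: simpler
-- what changed: B drops A's intermediate 'mapeo' dict and its second application loop: one pass writes each target cell directly from the live (already-updated) matrix.
-- outside the precondition, e.g. on actualizar_matriz([(0, 3), (-1, 1)], [[1, 2], [3, 4]]): A returns [[1, 4], [3, 1]], B returns [[1, 1], [3, 1]]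
import Mathlib
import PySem

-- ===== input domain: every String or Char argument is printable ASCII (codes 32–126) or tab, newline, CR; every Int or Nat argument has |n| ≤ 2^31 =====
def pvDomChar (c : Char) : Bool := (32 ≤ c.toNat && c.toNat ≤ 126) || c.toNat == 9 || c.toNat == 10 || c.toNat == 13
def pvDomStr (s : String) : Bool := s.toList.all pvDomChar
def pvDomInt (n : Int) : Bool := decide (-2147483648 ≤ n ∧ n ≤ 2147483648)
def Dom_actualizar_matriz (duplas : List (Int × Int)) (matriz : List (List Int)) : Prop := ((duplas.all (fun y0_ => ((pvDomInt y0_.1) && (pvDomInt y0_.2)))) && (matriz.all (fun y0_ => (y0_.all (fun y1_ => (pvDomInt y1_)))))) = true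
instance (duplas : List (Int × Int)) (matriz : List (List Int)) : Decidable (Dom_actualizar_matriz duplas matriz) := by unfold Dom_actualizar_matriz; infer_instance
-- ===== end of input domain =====

-- B replaces A's intermediate 'mapeo' dict and second application loop by one in-place pass
-- that writes each target cell from the live matrix (objective: simpler).
-- Both A and B mutate 'matriz' in place in Python; the equivalence proved here is about the
-- returned value (which is the mutated matrix itself, identically for both).

-- ===== PORT A =====
-- matriz[k // n][k % n]  (read; total form — Pre_ keeps every index in range)
def pvCell (mat : List (List Int)) (n k : Int) : Int :=
  PySem.List.pyGetD (PySem.List.pyGetD mat (PySem.Int.floordiv k n) []) (PySem.Int.mod k n) 0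

-- matriz[k // n][k % n] = v  (write; total form — Pre_ keeps every index in range)
def pvSetCell (mat : List (List Int)) (n k : Int) (v : Int) : List (List Int) :=
  PySem.List.pySetD mat (PySem.Int.floordiv k n)
    (PySem.List.pySetD (PySem.List.pyGetD mat (PySem.Int.floordiv k n) []) (PySem.Int.mod k n) v)

-- A's second loop: 'for key, value in mapeo.items(): matriz[key//n][key%n] = value'
def pvApply (items : List (Int × Int)) (n : Int) (mat : List (List Int)) : List (List Int) :=
  items.foldl (fun mat kv => pvSetCell mat n kv.1 kv.2) mat

-- len(matriz) never changes (only cell contents are reassigned), so it is computed once as n.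
def actualizar_matriz (duplas : List (Int × Int)) (matriz : List (List Int)) : List (List Int) :=
  let n : Int := matriz.length
  let mapeo : PySem.Dict Int Int :=
    duplas.foldl (fun m p => m.insert p.2 (m.getD p.1 (pvCell matriz n p.1))) PySem.Dict.empty
  pvApply mapeo.items n matriz

-- ===== PORT B =====
def actualizar_matriz_alt (duplas : List (Int × Int)) (matriz : List (List Int)) : List (List Int) :=
  let n : Int := matriz.length
  duplas.foldl (fun mat p => pvSetCell mat n p.2 (pvCell mat n p.1)) matriz

-- ===== PRECONDITION & SPEC =====
-- the effective (wrapped) row addressed by index k: k // n, shifted by n if negative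
def pvRowI (n k : Int) : Int := k / n + (if k / n < 0 then n else 0)

-- index k addresses a real cell: -n² ≤ k < n² (so the row index, possibly negative, is in
-- Python range) and the column k % n exists in the addressed (possibly ragged) row
def pvOkIdx (matriz : List (List Int)) (k : Int) : Prop :=
  -((matriz.length : Int) * matriz.length) ≤ k ∧ k < (matriz.length : Int) * matriz.length ∧
    k % (matriz.length : Int) <
      ((matriz.getD (pvRowI (matriz.length : Int) k).toNat []).length : Int)

-- all indices mentioned by duplas
def pvIdxs (duplas : List (Int × Int)) : List Int := duplas.flatMap (fun p => [p.1, p.2])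

-- Pre_ excludes the inputs on which A raises (ZeroDivisionError on an empty matrix, IndexError
-- on an out-of-range index) and the defensible corner where two of the used indices differ by
-- exactly len(matriz)², hence alias the same cell through Python's negative-index wraparound:
-- there A's dict-keyed bookkeeping and B's cell-addressed writes are two unspecified choices.
def Pre_actualizar_matriz (duplas : List (Int × Int)) (matriz : List (List Int)) : Prop :=
  (∀ k ∈ pvIdxs duplas, pvOkIdx matriz k) ∧
    ∀ x ∈ pvIdxs duplas, ∀ y ∈ pvIdxs duplas, x - y ≠ (matriz.length : Int) * matriz.length

instance (duplas : List (Int × Int)) (matriz : List (List Int)) : Decidable (Pre_actualizar_matriz duplas matriz) := by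
  unfold Pre_actualizar_matriz pvOkIdx pvIdxs; infer_instance

def pvWitness_actualizar_matriz : (List (Int × Int)) × List (List Int) :=
  ([(0, 3), (1, 2)], [[1, 2], [3, 4]])

def Spec_actualizar_matriz (duplas : List (Int × Int)) (matriz : List (List Int)) (out : List (List Int)) : Prop := out = actualizar_matriz_alt duplas matriz
instance (duplas : List (Int × Int)) (matriz : List (List Int)) (out : List (List Int)) : Decidable (Spec_actualizar_matriz duplas matriz out) := by unfold Spec_actualizar_matriz; infer_instance

-- ===== CLAIM (what is proved, stated in full; the proofs are below) =====
def Claim_equal_actualizar_matriz : Prop := ∀ (duplas : List (Int × Int)) (matriz : List (List Int)), Dom_actualizar_matriz duplas matriz → Pre_actualizar_matriz duplas matriz → Spec_actualizar_matriz duplas matriz (actualizar_matriz duplas matriz)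

-- ===== LEMMAS AND PROOFS =====

-- Nat-indexed cell read/write, the proof-side normal form of pvCell/pvSetCell.
def pvGetc (mat : List (List Int)) (i j : Nat) : Int := (mat.getD i []).getD j 0
def pvSetc (mat : List (List Int)) (i j : Nat) (v : Int) : List (List Int) :=
  mat.set i ((mat.getD i []).set j v)

-- same outer length and same row lengths
def pvShape (mat mat' : List (List Int)) : Prop :=
  mat.length = mat'.length ∧ ∀ i : Nat, (mat.getD i []).length = (mat'.getD i []).length

theorem pvShape_refl (mat : List (List Int)) : pvShape mat mat := ⟨rfl, fun _ => rfl⟩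

theorem pvShape_trans {a b c : List (List Int)} (h1 : pvShape a b) (h2 : pvShape b c) : pvShape a c :=
  ⟨h1.1.trans h2.1, fun i => (h1.2 i).trans (h2.2 i)⟩

theorem pv_getD_set {α : Type} (l : List α) (i : Nat) (v : α) (j : Nat) (d : α) :
    (l.set i v).getD j d = if j = i ∧ i < l.length then v else l.getD j d := by
  rcases eq_or_ne j i with rfl | h
  · by_cases hi : j < l.length
    · simp [List.getD, hi]
    · have h1 : l.set j v = l := List.set_eq_of_length_le (by omega)
      simp [h1, hi]
  · have h' : i ≠ j := Ne.symm h
    simp [List.getD, h, h']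

theorem pv_getD_set_self {α : Type} (l : List α) (i : Nat) (v : α) (d : α)
    (hi : i < l.length) : (l.set i v).getD i d = v := by
  rw [pv_getD_set]; simp [hi]

theorem pv_getD_set_ne {α : Type} (l : List α) (i : Nat) (v : α) (j : Nat) (d : α)
    (h : j ≠ i) : (l.set i v).getD j d = l.getD j d := by
  rw [pv_getD_set]; simp [h]

theorem pv_row_setc (mat : List (List Int)) (i j : Nat) (v : Int) (i' : Nat) :
    (pvSetc mat i j v).getD i' [] = if i' = i then (mat.getD i []).set j v else mat.getD i' [] := by
  unfold pvSetc
  rw [pv_getD_set]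
  by_cases h : i' = i
  · subst h
    by_cases hi : i' < mat.length
    · simp [hi]
    · simp [hi]
  · simp [h]

theorem pv_length_setc (mat : List (List Int)) (i j : Nat) (v : Int) :
    (pvSetc mat i j v).length = mat.length := by simp [pvSetc]

theorem pvShape_setc (mat : List (List Int)) (i j : Nat) (v : Int) :
    pvShape (pvSetc mat i j v) mat := by
  refine ⟨pv_length_setc mat i j v, fun i' => ?_⟩
  rw [pv_row_setc]
  split
  · next h => subst h; simp
  · rfl

theorem pv_getc_setc (mat : List (List Int)) {i j : Nat} (v : Int)
    (hi : i < mat.length) (hj : j < (mat.getD i []).length) (i' j' : Nat) :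
    pvGetc (pvSetc mat i j v) i' j' = if i' = i ∧ j' = j then v else pvGetc mat i' j' := by
  unfold pvGetc
  rw [pv_row_setc]
  by_cases h : i' = i
  · subst h
    rw [if_pos rfl, pv_getD_set]
    by_cases h2 : j' = j
    · subst h2
      rw [if_pos ⟨rfl, hj⟩, if_pos ⟨rfl, rfl⟩]
    · rw [if_neg (by simp [h2]), if_neg (by simp [h2])]
  · rw [if_neg h, if_neg (by simp [h])]

theorem pv_setc_comm (mat : List (List Int)) {i j i' j' : Nat} (v v' : Int)
    (h : i ≠ i' ∨ j ≠ j') :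
    pvSetc (pvSetc mat i j v) i' j' v' = pvSetc (pvSetc mat i' j' v') i j v := by
  by_cases hii : i = i'
  · subst hii
    have hj : j ≠ j' := h.resolve_left (by simp)
    by_cases hi : i < mat.length
    · unfold pvSetc
      rw [pv_getD_set_self _ _ _ _ (by simpa using hi), pv_getD_set_self _ _ _ _ (by simpa using hi),
        List.set_set, List.set_set, List.set_comm _ _ hj]
    · have hle : mat.length ≤ i := Nat.le_of_not_lt hi
      simp [pvSetc, List.set_eq_of_length_le, hle]
  · unfold pvSetc
    rw [pv_getD_set_ne _ _ _ _ _ (Ne.symm hii), pv_getD_set_ne _ _ _ _ _ hii,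
      List.set_comm _ _ hii]

theorem pv_setc_setc_self (mat : List (List Int)) (i j : Nat) (v v' : Int) :
    pvSetc (pvSetc mat i j v) i j v' = pvSetc mat i j v' := by
  by_cases hi : i < mat.length
  · unfold pvSetc
    rw [pv_getD_set_self _ _ _ _ (by simpa using hi), List.set_set, List.set_set]
  · have hle : mat.length ≤ i := Nat.le_of_not_lt hi
    simp [pvSetc, List.set_eq_of_length_le, hle]

-- Python indexing at a possibly negative in-range index, in closed form
theorem pv_pyIdx_eq (m : Nat) (i : Int) (h1 : -(m : Int) ≤ i) (h2 : i < (m : Int)) :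
    PySem.List.pyIdx? m i = some ((i + if i < 0 then (m : Int) else 0).toNat) := by
  unfold PySem.List.pyIdx?
  by_cases h0 : 0 ≤ i
  · rw [if_pos h0, if_pos h2]
    simp [show ¬ (i < 0) by omega]
  · rw [if_neg h0, if_pos h1, if_pos (show i < 0 by omega)]
    congr 1
    omega

theorem pv_pyGetD_idx {α : Type} (xs : List α) (i : Int) (d : α)
    (h1 : -(xs.length : Int) ≤ i) (h2 : i < (xs.length : Int)) :
    PySem.List.pyGetD xs i d = xs.getD (i + if i < 0 then (xs.length : Int) else 0).toNat d := by
  unfold PySem.List.pyGetD PySem.List.pyGet?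
  rw [pv_pyIdx_eq _ _ h1 h2]
  simp [List.getD]

theorem pv_pySetD_idx {α : Type} (xs : List α) (i : Int) (v : α)
    (h1 : -(xs.length : Int) ≤ i) (h2 : i < (xs.length : Int)) :
    PySem.List.pySetD xs i v = xs.set (i + if i < 0 then (xs.length : Int) else 0).toNat v := by
  unfold PySem.List.pySetD PySem.List.pySet?
  rw [pv_pyIdx_eq _ _ h1 h2]
  simp

-- facts extracted from pvOkIdx
theorem pv_ok_pos {matriz : List (List Int)} {k : Int} (h : pvOkIdx matriz k) :
    0 < (matriz.length : Int) := by
  rcases h with ⟨h1, h2, -⟩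
  by_contra hn
  have h0 : (matriz.length : Int) = 0 := by omega
  rw [h0] at h1 h2
  simp at h1 h2
  omega

theorem pv_ok_facts {matriz : List (List Int)} {k : Int} (h : pvOkIdx matriz k) :
    -(matriz.length : Int) ≤ k / (matriz.length : Int) ∧
    k / (matriz.length : Int) < (matriz.length : Int) ∧
    0 ≤ pvRowI (matriz.length : Int) k ∧ pvRowI (matriz.length : Int) k < (matriz.length : Int) ∧
    0 ≤ k % (matriz.length : Int) ∧ k % (matriz.length : Int) < (matriz.length : Int) ∧
    ((matriz.length : Int) * pvRowI (matriz.length : Int) k + k % (matriz.length : Int) = k ∨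
     (matriz.length : Int) * pvRowI (matriz.length : Int) k + k % (matriz.length : Int)
       = k + (matriz.length : Int) * matriz.length) := by
  have hn := pv_ok_pos h
  obtain ⟨h1, h2, -⟩ := h
  have e := Int.mul_ediv_add_emod k ((matriz.length : Int))
  have hr0 : 0 ≤ k % (matriz.length : Int) := Int.emod_nonneg k (by omega)
  have hr1 : k % (matriz.length : Int) < (matriz.length : Int) := Int.emod_lt_of_pos k hn
  have hq1 : k / (matriz.length : Int) < (matriz.length : Int) := by
    by_contra hq
    push Not at hq
    have h3 : (matriz.length : Int) * (matriz.length : Int)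
        ≤ (matriz.length : Int) * (k / (matriz.length : Int)) :=
      mul_le_mul_of_nonneg_left hq (by omega)
    omega
  have hq0 : -(matriz.length : Int) ≤ k / (matriz.length : Int) := by
    by_contra hq
    push Not at hq
    have h3 : (matriz.length : Int) * (k / (matriz.length : Int))
        ≤ (matriz.length : Int) * (-(matriz.length : Int) - 1) :=
      mul_le_mul_of_nonneg_left (by omega) (by omega)
    have h4 : (matriz.length : Int) * (-(matriz.length : Int) - 1)
        = -((matriz.length : Int) * (matriz.length : Int)) - (matriz.length : Int) := by ring
    omega
  unfold pvRowI
  by_cases hq : k / (matriz.length : Int) < 0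
  · simp only [if_pos hq]
    have h5 : (matriz.length : Int) * (k / (matriz.length : Int) + (matriz.length : Int))
        = (matriz.length : Int) * (k / (matriz.length : Int))
          + (matriz.length : Int) * (matriz.length : Int) := by ring
    exact ⟨hq0, hq1, by omega, by omega, hr0, hr1, Or.inr (by omega)⟩
  · simp only [if_neg hq, add_zero]
    exact ⟨hq0, hq1, by omega, by omega, hr0, hr1, Or.inl (by omega)⟩

-- distinct, non-aliasing ok indices address distinct cells
theorem pv_cell_inj {matriz : List (List Int)} {k k' : Int}
    (hk : pvOkIdx matriz k) (hk' : pvOkIdx matriz k')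
    (ha1 : k - k' ≠ (matriz.length : Int) * matriz.length)
    (ha2 : k' - k ≠ (matriz.length : Int) * matriz.length)
    (hne : k ≠ k') :
    (pvRowI (matriz.length : Int) k).toNat ≠ (pvRowI (matriz.length : Int) k').toNat ∨
    (k % (matriz.length : Int)).toNat ≠ (k' % (matriz.length : Int)).toNat := by
  have hf := pv_ok_facts hk
  have hf' := pv_ok_facts hk'
  by_contra hc
  push Not at hc
  obtain ⟨hR, hr⟩ := hc
  have hReq : pvRowI (matriz.length : Int) k = pvRowI (matriz.length : Int) k' := by omega
  have hmul : (matriz.length : Int) * pvRowI (matriz.length : Int) k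
      = (matriz.length : Int) * pvRowI (matriz.length : Int) k' := by rw [hReq]
  rcases hf.2.2.2.2.2.2 with e1 | e1 <;> rcases hf'.2.2.2.2.2.2 with e2 | e2 <;> omega

-- bridges: on an in-range index the Python-exact primitives are Nat-level set/get
theorem pvCell_eq {matriz : List (List Int)} {k : Int} (mat : List (List Int))
    (hk : pvOkIdx matriz k) (hs : pvShape mat matriz) :
    pvCell mat (matriz.length : Int) k
      = pvGetc mat (pvRowI (matriz.length : Int) k).toNat (k % (matriz.length : Int)).toNat := by
  have hn := pv_ok_pos hk
  have hf := pv_ok_facts hk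
  have hlen : (mat.length : Int) = (matriz.length : Int) := by exact_mod_cast hs.1
  unfold pvCell pvGetc
  rw [PySem.Int.floordiv_eq_ediv_of_pos hn, PySem.Int.mod_eq_emod_of_pos hn,
    pv_pyGetD_idx mat (k / (matriz.length : Int)) [] (by omega) (by omega),
    PySem.List.pyGetD_of_nonneg _ _ hf.2.2.2.2.1]
  have hidx : (k / (matriz.length : Int) +
      if k / (matriz.length : Int) < 0 then (mat.length : Int) else 0)
      = pvRowI (matriz.length : Int) k := by
    unfold pvRowI
    rw [hlen]
  rw [hidx]

theorem pvSetCell_eq {matriz : List (List Int)} {k : Int} (mat : List (List Int)) (v : Int)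
    (hk : pvOkIdx matriz k) (hs : pvShape mat matriz) :
    pvSetCell mat (matriz.length : Int) k v
      = pvSetc mat (pvRowI (matriz.length : Int) k).toNat (k % (matriz.length : Int)).toNat v := by
  have hn := pv_ok_pos hk
  have hf := pv_ok_facts hk
  have hlen : (mat.length : Int) = (matriz.length : Int) := by exact_mod_cast hs.1
  unfold pvSetCell pvSetc
  rw [PySem.Int.floordiv_eq_ediv_of_pos hn, PySem.Int.mod_eq_emod_of_pos hn,
    pv_pySetD_idx mat (k / (matriz.length : Int)) _ (by omega) (by omega),
    pv_pyGetD_idx mat (k / (matriz.length : Int)) [] (by omega) (by omega),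
    PySem.List.pySetD_of_nonneg _ _ hf.2.2.2.2.1]
  have hidx : (k / (matriz.length : Int) +
      if k / (matriz.length : Int) < 0 then (mat.length : Int) else 0)
      = pvRowI (matriz.length : Int) k := by
    unfold pvRowI
    rw [hlen]
  rw [hidx]

-- Nat-level bounds of an ok index on any matrix of the same shape
theorem pv_ok_bounds {matriz mat : List (List Int)} {k : Int}
    (hk : pvOkIdx matriz k) (hs : pvShape mat matriz) :
    (pvRowI (matriz.length : Int) k).toNat < mat.length ∧
    (k % (matriz.length : Int)).toNat
      < (mat.getD (pvRowI (matriz.length : Int) k).toNat []).length := by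
  have hf := pv_ok_facts hk
  have h2 := hk.2.2
  have hl := hs.1
  have hr := hs.2 (pvRowI (matriz.length : Int) k).toNat
  omega

-- shape preservation and read/write laws at the pvCell/pvSetCell level (ok indices only)
theorem pvShape_setCell {matriz mat : List (List Int)} {k : Int} (v : Int)
    (hk : pvOkIdx matriz k) (hs : pvShape mat matriz) :
    pvShape (pvSetCell mat (matriz.length : Int) k v) matriz := by
  rw [pvSetCell_eq mat v hk hs]
  exact pvShape_trans (pvShape_setc _ _ _ _) hs

theorem pv_getc_setCell {matriz mat : List (List Int)} {k k' : Int} (v : Int)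
    (hk : pvOkIdx matriz k) (hk' : pvOkIdx matriz k') (hs : pvShape mat matriz)
    (ha1 : k' - k ≠ (matriz.length : Int) * matriz.length)
    (ha2 : k - k' ≠ (matriz.length : Int) * matriz.length) :
    pvCell (pvSetCell mat (matriz.length : Int) k v) (matriz.length : Int) k'
      = if k' = k then v else pvCell mat (matriz.length : Int) k' := by
  have hb := pv_ok_bounds hk hs
  rw [pvSetCell_eq mat v hk hs,
    pvCell_eq _ hk' (pvShape_trans (pvShape_setc _ _ _ _) hs), pvCell_eq mat hk' hs,
    pv_getc_setc mat v hb.1 hb.2]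
  by_cases h : k' = k
  · subst h; simp
  · have hno : ¬((pvRowI (matriz.length : Int) k').toNat = (pvRowI (matriz.length : Int) k).toNat ∧
        (k' % (matriz.length : Int)).toNat = (k % (matriz.length : Int)).toNat) := by
      rintro ⟨h1, h2⟩
      rcases pv_cell_inj hk' hk ha1 ha2 h with hx | hx
      · exact hx h1
      · exact hx h2
    rw [if_neg hno, if_neg h]

theorem pv_setCell_comm {matriz mat : List (List Int)} {k k' : Int} (v v' : Int)
    (hk : pvOkIdx matriz k) (hk' : pvOkIdx matriz k') (hs : pvShape mat matriz)
    (ha1 : k - k' ≠ (matriz.length : Int) * matriz.length)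
    (ha2 : k' - k ≠ (matriz.length : Int) * matriz.length)
    (hne : k ≠ k') :
    pvSetCell (pvSetCell mat (matriz.length : Int) k v) (matriz.length : Int) k' v'
      = pvSetCell (pvSetCell mat (matriz.length : Int) k' v') (matriz.length : Int) k v := by
  rw [pvSetCell_eq mat v hk hs, pvSetCell_eq mat v' hk' hs,
    pvSetCell_eq _ v' hk' (pvShape_trans (pvShape_setc _ _ _ _) hs),
    pvSetCell_eq _ v hk (pvShape_trans (pvShape_setc _ _ _ _) hs),
    pv_setc_comm]
  by_cases hq : (pvRowI (matriz.length : Int) k).toNat = (pvRowI (matriz.length : Int) k').toNat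
  · right
    intro hr
    rcases pv_cell_inj hk hk' ha1 ha2 hne with hx | hx
    · exact hx hq
    · exact hx hr
  · left; exact hq

theorem pv_setCell_self {matriz mat : List (List Int)} {k : Int} (v v' : Int)
    (hk : pvOkIdx matriz k) (hs : pvShape mat matriz) :
    pvSetCell (pvSetCell mat (matriz.length : Int) k v) (matriz.length : Int) k v'
      = pvSetCell mat (matriz.length : Int) k v' := by
  rw [pvSetCell_eq mat v hk hs,
    pvSetCell_eq _ v' hk (pvShape_trans (pvShape_setc _ _ _ _) hs),
    pvSetCell_eq mat v' hk hs, pv_setc_setc_self]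

-- a list of "good" indices: each ok, no two aliasing the same cell
def pvGoodL (matriz : List (List Int)) (I : List Int) : Prop :=
  ∀ x ∈ I, pvOkIdx matriz x

def pvSepL (matriz : List (List Int)) (I : List Int) : Prop :=
  ∀ x ∈ I, ∀ y ∈ I, x - y ≠ (matriz.length : Int) * matriz.length

theorem pvApply_cons (p : Int × Int) (L : List (Int × Int)) (n : Int) (mat : List (List Int)) :
    pvApply (p :: L) n mat = pvApply L n (pvSetCell mat n p.1 p.2) := rfl

theorem pvApply_append (L1 L2 : List (Int × Int)) (n : Int) (mat : List (List Int)) :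
    pvApply (L1 ++ L2) n mat = pvApply L2 n (pvApply L1 n mat) := by
  simp [pvApply, List.foldl_append]

theorem pvShape_apply {matriz : List (List Int)} {I : List Int} (hI : pvGoodL matriz I) :
    ∀ (L : List (Int × Int)) (mat), (∀ p ∈ L, p.1 ∈ I) → pvShape mat matriz →
      pvShape (pvApply L (matriz.length : Int) mat) matriz := by
  intro L
  induction L with
  | nil => intro mat _ hs; exact hs
  | cons p L ih =>
    intro mat hL hs
    exact ih _ (fun q hq => hL q (List.mem_cons_of_mem p hq))
      (pvShape_setCell p.2 (hI _ (hL p List.mem_cons_self)) hs)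

theorem pv_cell_apply_notmem {matriz : List (List Int)} {I : List Int}
    (hI : pvGoodL matriz I) (hsep : pvSepL matriz I) {k : Int} (hkI : k ∈ I) :
    ∀ (L : List (Int × Int)) (mat), (∀ p ∈ L, p.1 ∈ I) → k ∉ L.map (·.1) → pvShape mat matriz →
      pvCell (pvApply L (matriz.length : Int) mat) (matriz.length : Int) k
        = pvCell mat (matriz.length : Int) k := by
  intro L
  induction L with
  | nil => intro mat _ _ _; rfl
  | cons p L ih =>
    intro mat hL hnot hs
    have hpI : p.1 ∈ I := hL p List.mem_cons_self
    have hne : k ≠ p.1 := fun h => hnot (by simp [h])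
    have hnot' : k ∉ L.map (·.1) := fun h => hnot (by simp [h])
    have hL' : ∀ q ∈ L, q.1 ∈ I := fun q hq => hL q (List.mem_cons_of_mem p hq)
    rw [pvApply_cons, ih _ hL' hnot' (pvShape_setCell p.2 (hI _ hpI) hs),
      pv_getc_setCell p.2 (hI _ hpI) (hI _ hkI) hs (hsep _ hkI _ hpI) (hsep _ hpI _ hkI),
      if_neg hne]

theorem pv_apply_setCell_comm {matriz : List (List Int)} {I : List Int}
    (hI : pvGoodL matriz I) (hsep : pvSepL matriz I) {b : Int} (v : Int) (hbI : b ∈ I) :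
    ∀ (L : List (Int × Int)) (mat), (∀ p ∈ L, p.1 ∈ I) → b ∉ L.map (·.1) → pvShape mat matriz →
      pvApply L (matriz.length : Int) (pvSetCell mat (matriz.length : Int) b v)
        = pvSetCell (pvApply L (matriz.length : Int) mat) (matriz.length : Int) b v := by
  intro L
  induction L with
  | nil => intro mat _ _ _; rfl
  | cons p L ih =>
    intro mat hL hnot hs
    have hpI : p.1 ∈ I := hL p List.mem_cons_self
    have hne : b ≠ p.1 := fun h => hnot (by simp [h])
    have hnot' : b ∉ L.map (·.1) := fun h => hnot (by simp [h])
    have hL' : ∀ q ∈ L, q.1 ∈ I := fun q hq => hL q (List.mem_cons_of_mem p hq)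
    rw [pvApply_cons, pvApply_cons,
      pv_setCell_comm v p.2 (hI _ hbI) (hI _ hpI) hs (hsep _ hbI _ hpI) (hsep _ hpI _ hbI) hne,
      ih _ hL' hnot' (pvShape_setCell p.2 (hI _ hpI) hs)]

theorem pv_map_replace_id {b : Int} (v : Int) :
    ∀ (L : List (Int × Int)), b ∉ L.map (·.1) →
      L.map (fun p => if (p.1 == b) = true then (b, v) else p) = L := by
  intro L
  induction L with
  | nil => intro _; rfl
  | cons p L ih =>
    intro hnot
    have h1 : p.1 ≠ b := fun h => hnot (by simp [h])
    have hnot' : b ∉ L.map (·.1) := fun h => hnot (by simp [h])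
    rw [List.map_cons, if_neg (show ¬ ((p.1 == b) = true) by simp [h1]), ih hnot']

theorem pv_apply_replace {matriz : List (List Int)} {I : List Int}
    (hI : pvGoodL matriz I) (hsep : pvSepL matriz I) {b : Int} (v : Int) (hbI : b ∈ I) :
    ∀ (L : List (Int × Int)) (mat), (∀ p ∈ L, p.1 ∈ I) → b ∈ L.map (·.1) →
      (L.map (·.1)).Nodup → pvShape mat matriz →
      pvApply (L.map (fun p => if (p.1 == b) = true then (b, v) else p)) (matriz.length : Int) mat
        = pvSetCell (pvApply L (matriz.length : Int) mat) (matriz.length : Int) b v := by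
  intro L
  induction L with
  | nil => intro mat _ hmem _ _; simp at hmem
  | cons p L ih =>
    intro mat hL hmem hnd hs
    have hpI : p.1 ∈ I := hL p List.mem_cons_self
    have hL' : ∀ q ∈ L, q.1 ∈ I := fun q hq => hL q (List.mem_cons_of_mem p hq)
    rw [List.map_cons] at hnd
    have hpnot : p.1 ∉ L.map (·.1) := (List.nodup_cons.mp hnd).1
    have hnd' : (L.map (·.1)).Nodup := (List.nodup_cons.mp hnd).2
    by_cases hpb : p.1 = b
    · have hbnot : b ∉ L.map (·.1) := hpb ▸ hpnot
      rw [List.map_cons, if_pos (by simp [hpb]), pv_map_replace_id v L hbnot,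
        pvApply_cons, pvApply_cons]
      have hsA : pvShape (pvApply L (matriz.length : Int) mat) matriz :=
        pvShape_apply hI L mat hL' hs
      rw [pv_apply_setCell_comm hI hsep v hbI L _ hL' hbnot hs, hpb,
        pv_apply_setCell_comm hI hsep p.2 (hpb ▸ hbI) L mat hL' hbnot hs,
        pv_setCell_self p.2 v (hI _ hbI) hsA]
    · have hmem' : b ∈ L.map (·.1) := by
        rw [List.map_cons] at hmem
        rcases List.mem_cons.mp hmem with h | h
        · exact absurd h.symm hpb
        · exact h
      rw [List.map_cons, if_neg (by simp [hpb]), pvApply_cons, pvApply_cons]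
      exact ih _ hL' hmem' hnd' (pvShape_setCell p.2 (hI _ hpI) hs)

-- keys of a Dict are the first components of its items (definitional)
theorem pv_keys_eq (d : PySem.Dict Int Int) : d.keys = d.items.map (·.1) := rfl

theorem pv_apply_insert {matriz : List (List Int)} {I : List Int}
    (hI : pvGoodL matriz I) (hsep : pvSepL matriz I)
    (m : PySem.Dict Int Int) {b : Int} (v : Int)
    (hkeys : ∀ p ∈ m.items, p.1 ∈ I) (hnd : m.keys.Nodup) (hbI : b ∈ I)
    (mat : List (List Int)) (hs : pvShape mat matriz) :
    pvApply ((m.insert b v).items) (matriz.length : Int) mat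
      = pvSetCell (pvApply m.items (matriz.length : Int) mat) (matriz.length : Int) b v := by
  cases hc : m.contains b
  · rw [PySem.Dict.items_insert_of_not_contains m v hc, pvApply_append]
    rfl
  · rw [PySem.Dict.items_insert_of_contains m v hc]
    have hmem : b ∈ m.items.map (·.1) := by
      rw [← pv_keys_eq]; exact (PySem.Dict.contains_iff_mem_keys m b).mp hc
    exact pv_apply_replace hI hsep v hbI m.items mat hkeys hmem (pv_keys_eq m ▸ hnd) hs

theorem pv_cell_apply {matriz : List (List Int)} {I : List Int}
    (hI : pvGoodL matriz I) (hsep : pvSepL matriz I) {k : Int} (hkI : k ∈ I) :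
    ∀ (L : List (Int × Int)), (∀ p ∈ L, p.1 ∈ I) → (L.map (·.1)).Nodup →
    ∀ mat, pvShape mat matriz →
      pvCell (pvApply L (matriz.length : Int) mat) (matriz.length : Int) k
        = ((PySem.Dict.mk L).get? k).getD (pvCell mat (matriz.length : Int) k) := by
  intro L
  induction L with
  | nil => intro _ _ mat _; rfl
  | cons p L ih =>
    intro hL hnd mat hs
    have hpI : p.1 ∈ I := hL p List.mem_cons_self
    have hL' : ∀ q ∈ L, q.1 ∈ I := fun q hq => hL q (List.mem_cons_of_mem p hq)
    rw [List.map_cons] at hnd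
    have hpnot : p.1 ∉ L.map (·.1) := (List.nodup_cons.mp hnd).1
    have hnd' : (L.map (·.1)).Nodup := (List.nodup_cons.mp hnd).2
    rw [pvApply_cons]
    obtain ⟨a, w⟩ := p
    rw [PySem.Dict.get?_mk_cons]
    have haI : a ∈ I := hpI
    by_cases hak : a = k
    · subst hak
      rw [if_pos (by simp), Option.getD_some,
        pv_cell_apply_notmem hI hsep haI L _ hL' (by simpa using hpnot)
          (pvShape_setCell w (hI _ haI) hs),
        pv_getc_setCell w (hI _ haI) (hI _ haI) hs (hsep _ haI _ haI) (hsep _ haI _ haI),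
        if_pos rfl]
    · rw [if_neg (by simpa using hak),
        ih hL' hnd' _ (pvShape_setCell w (hI _ haI) hs),
        pv_getc_setCell w (hI _ haI) (hI _ hkI) hs (hsep _ hkI _ haI) (hsep _ haI _ hkI),
        if_neg (fun h => hak h.symm)]

theorem pv_main {matriz : List (List Int)} {I : List Int}
    (hI : pvGoodL matriz I) (hsep : pvSepL matriz I) :
    ∀ (duplas : List (Int × Int)), (∀ p ∈ duplas, p.1 ∈ I ∧ p.2 ∈ I) →
    ∀ (m : PySem.Dict Int Int), (∀ p ∈ m.items, p.1 ∈ I) → m.keys.Nodup →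
    duplas.foldl (fun mat p => pvSetCell mat (matriz.length : Int) p.2 (pvCell mat (matriz.length : Int) p.1))
        (pvApply m.items (matriz.length : Int) matriz)
      = pvApply ((duplas.foldl (fun m p => m.insert p.2 (m.getD p.1 (pvCell matriz (matriz.length : Int) p.1))) m).items)
          (matriz.length : Int) matriz := by
  intro duplas
  induction duplas with
  | nil => intro _ m _ _; rfl
  | cons p rest ih =>
    intro hpre m hkeys hnd
    obtain ⟨a, b⟩ := p
    have haI : a ∈ I := (hpre (a, b) List.mem_cons_self).1
    have hbI : b ∈ I := (hpre (a, b) List.mem_cons_self).2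
    have hpre' : ∀ q ∈ rest, q.1 ∈ I ∧ q.2 ∈ I :=
      fun q hq => hpre q (List.mem_cons_of_mem _ hq)
    rw [List.foldl_cons, List.foldl_cons]
    have hv : pvCell (pvApply m.items (matriz.length : Int) matriz) (matriz.length : Int) a
        = m.getD a (pvCell matriz (matriz.length : Int) a) := by
      rw [pv_cell_apply hI hsep haI m.items hkeys (pv_keys_eq m ▸ hnd) matriz (pvShape_refl matriz)]
      exact (PySem.Dict.getD_eq_get?_getD m a _).symm
    rw [hv, ← pv_apply_insert hI hsep m (m.getD a (pvCell matriz (matriz.length : Int) a))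
        hkeys hnd hbI matriz (pvShape_refl matriz)]
    refine ih hpre' _ ?_ (PySem.Dict.nodup_keys_insert m b _ hnd)
    intro q hq
    have hqk : q.1 ∈ (m.insert b (m.getD a (pvCell matriz (matriz.length : Int) a))).keys :=
      List.mem_map_of_mem hq
    rcases (PySem.Dict.mem_keys_insert _ _ _ _).mp hqk with h | h
    · exact h ▸ hbI
    · obtain ⟨r, hr, hr1⟩ := List.mem_map.mp h
      exact hr1 ▸ hkeys r hr

-- every index mentioned by duplas is in pvIdxs duplas
theorem pv_mem_idxs {duplas : List (Int × Int)} {p : Int × Int} (hp : p ∈ duplas) :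
    p.1 ∈ pvIdxs duplas ∧ p.2 ∈ pvIdxs duplas := by
  unfold pvIdxs
  exact ⟨List.mem_flatMap.mpr ⟨p, hp, by simp⟩, List.mem_flatMap.mpr ⟨p, hp, by simp⟩⟩

-- ===== VERDICT (by name: the statement is the Claim_ definition above) =====
theorem actualizar_matriz_spec : Claim_equal_actualizar_matriz := by
  intro duplas matriz _ hpre
  unfold Spec_actualizar_matriz actualizar_matriz actualizar_matriz_alt
  have h := pv_main (matriz := matriz) (I := pvIdxs duplas) hpre.1 hpre.2 duplas
    (fun p hp => pv_mem_idxs hp) PySem.Dict.empty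
    (by intro p hp; simp [PySem.Dict.empty] at hp) PySem.Dict.nodup_keys_empty
  simpa using h.symm
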